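-- pv_equiv track=rewrite | github.com/ESZlab/SmithHunter | sharp_smith.py | restrict_range
-- ===== SOURCE A (Python) =====
-- def restrict_range(input):
--     start_range = None
--     for a in range(0,len(input)):
--         if input[a] != 0:
--             end_range = a
--             if start_range is None:
--                 start_range = a
--     return input[start_range:(end_range+1)]
-- ===== SOURCE B (Python) =====
-- def restrict_range(input):
--     start = None
--     for i, v in enumerate(input):
--         if v != 0:
--             start = i
--             break
--     if start is None:
--         return []
--     end = len(input) - 1
--     while input[end] == 0:
--         end -= 1
--     return input[start:end + 1]
-- ===== Notes on version B (the rewrite author's own statement) =====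
-- stated objective: alternative
-- what changed: A keeps updating start/end indices over one full forward pass; B does two short directional scans with early exit (forward for the first nonzero, backward from the end for the last) and returns [] when there is no nonzero element.
-- outside the precondition, e.g. on restrict_range([]): A raises UnboundLocalError, B returns []; on restrict_range([0, 0]): A raises UnboundLocalError, B returns []
-- crash fix: On inputs with no nonzero element (including the empty list) A raises UnboundLocalError because end_range is never assigned; B returns []. — e.g. on restrict_range([0, 0]): A raises UnboundLocalError, B returns []
import Mathlib
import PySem

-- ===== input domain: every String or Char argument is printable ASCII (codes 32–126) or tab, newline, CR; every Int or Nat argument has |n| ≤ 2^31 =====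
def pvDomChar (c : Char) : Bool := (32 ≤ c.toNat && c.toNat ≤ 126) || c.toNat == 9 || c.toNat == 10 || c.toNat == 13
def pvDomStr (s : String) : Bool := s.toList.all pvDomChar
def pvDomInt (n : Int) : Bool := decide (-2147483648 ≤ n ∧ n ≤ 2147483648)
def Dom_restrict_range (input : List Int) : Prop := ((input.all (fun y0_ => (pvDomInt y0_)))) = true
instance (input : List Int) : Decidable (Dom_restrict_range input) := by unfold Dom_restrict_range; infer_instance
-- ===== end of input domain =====

-- B replaces A's single full forward pass (continuously updating start/end) by two early-exit
-- directional scans; on all-zero or empty input A raises UnboundLocalError, B returns [] (see Raises_).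


-- ===== PORT A =====
-- A's loop 'for a in range(0,len(input))' with 'input[a]', as the obvious structural recursion
-- carrying the index a and the two optional indices start_range / end_range.
def pvLoopA (l : List Int) (a : Nat) (s e : Option Nat) : Option Nat × Option Nat :=
  match l with
  | [] => (s, e)
  | x :: xs =>
    if x ≠ 0 then
      pvLoopA xs (a + 1) (if s = none then some a else s) (some a)
    else
      pvLoopA xs (a + 1) s e

def restrict_range (input : List Int) : List Int :=
  match pvLoopA input 0 none none with
  | (some s, some e) => PySem.List.slice input (some (s : Int)) (some ((e : Int) + 1))
  | _ => []  -- end_range never assigned: Python raises UnboundLocalError (excluded by Pre_)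

-- ===== PORT B =====
-- forward scan with early break: index of the first nonzero element
def pvFindFwd (l : List Int) (i : Nat) : Option Nat :=
  match l with
  | [] => none
  | x :: xs => if x ≠ 0 then some i else pvFindFwd xs (i + 1)

-- backward 'while input[end] == 0: end -= 1' scan; exact whenever some index ≤ e is nonzero
-- (guaranteed under Pre_, where B calls it)
def pvBwd (l : List Int) : Nat → Nat
  | 0 => 0
  | e + 1 => if l.getD (e + 1) 0 = 0 then pvBwd l e else e + 1

def restrict_range_alt (input : List Int) : List Int :=
  match pvFindFwd input 0 with
  | none => []
  | some s =>
    let e := pvBwd input (input.length - 1)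
    PySem.List.slice input (some (s : Int)) (some ((e : Int) + 1))

-- ===== PRECONDITION & SPEC =====
-- Pre_ excludes exactly the inputs with no nonzero element, on which A raises UnboundLocalError.
def Pre_restrict_range (input : List Int) : Prop := ∃ x ∈ input, x ≠ 0
instance (input : List Int) : Decidable (Pre_restrict_range input) := by
  unfold Pre_restrict_range; infer_instance
def pvWitness_restrict_range : List Int := [0, 3, 0]

-- On inputs with no nonzero element (including the empty list) A raises UnboundLocalError
-- because end_range is never assigned; B returns [].
def Raises_restrict_range (input : List Int) : Prop := ∀ x ∈ input, x = 0
instance (input : List Int) : Decidable (Raises_restrict_range input) := by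
  unfold Raises_restrict_range; infer_instance
def pvRaiseWitness_restrict_range : List Int := [0, 0]
def pvRaiseWitnessOut_restrict_range : List Int := []

def Spec_restrict_range (input : List Int) (out : List Int) : Prop := out = restrict_range_alt input
instance (input : List Int) (out : List Int) : Decidable (Spec_restrict_range input out) := by
  unfold Spec_restrict_range; infer_instance

-- ===== CLAIM (what is proved, stated in full; the proofs are below) =====
def Claim_equal_restrict_range : Prop := ∀ (input : List Int), Dom_restrict_range input → Pre_restrict_range input → Spec_restrict_range input (restrict_range input)
def Claim_raises_restrict_range : Prop := (∀ (input : List Int), Dom_restrict_range input → Raises_restrict_range input → ¬ Pre_restrict_range input) ∧ (Dom_restrict_range (pvRaiseWitness_restrict_range) ∧ Raises_restrict_range (pvRaiseWitness_restrict_range) ∧ restrict_range_alt (pvRaiseWitness_restrict_range) = pvRaiseWitnessOut_restrict_range)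

-- ===== LEMMAS AND PROOFS =====

-- index (counted within the list) of the LAST nonzero element
def pvLast? : List Int → Option Nat
  | [] => none
  | x :: xs =>
    match pvLast? xs with
    | some j => some (j + 1)
    | none => if x ≠ 0 then some 0 else none

theorem pvLoopA_eq (l : List Int) : ∀ (a : Nat) (s e : Option Nat),
    pvLoopA l a s e = (s.or (pvFindFwd l a), ((pvLast? l).map (fun j => a + j)).or e) := by
  induction l with
  | nil => intro a s e; simp [pvLoopA, pvFindFwd, pvLast?]
  | cons x xs ih =>
    intro a s e
    by_cases hx : x = 0
    · simp only [pvLoopA, pvFindFwd, pvLast?, hx, ne_eq, not_true_eq_false, if_false]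
      rw [ih]
      cases h : pvLast? xs with
      | none => cases s <;> simp [Option.or]
      | some j => cases s <;> simp [Option.or, Nat.add_assoc, Nat.add_comm 1 j]
    · simp only [pvLoopA, pvFindFwd, pvLast?, hx, ne_eq, not_false_eq_true, if_true]
      rw [ih]
      cases h : pvLast? xs with
      | none => cases s <;> simp [Option.or]
      | some j => cases s <;> simp [Option.or, Nat.add_assoc, Nat.add_comm 1 j]

theorem pvLast?_none (l : List Int) : pvLast? l = none ↔ ∀ x ∈ l, x = 0 := by
  induction l with
  | nil => simp [pvLast?]
  | cons x xs ih =>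
    simp only [pvLast?]
    cases h : pvLast? xs with
    | some j => simp [h] at ih; simp [ih]
    | none =>
      rw [h] at ih
      by_cases hx : x = 0 <;> simp [hx, ← ih]

theorem pvLast?_spec (l : List Int) : ∀ j, pvLast? l = some j →
    j < l.length ∧ l.getD j 0 ≠ 0 ∧ ∀ k, j < k → k < l.length → l.getD k 0 = 0 := by
  induction l with
  | nil => intro j h; simp [pvLast?] at h
  | cons x xs ih =>
    intro j h
    cases hx : pvLast? xs with
    | some j' =>
      simp only [pvLast?, hx] at h
      obtain ⟨h1, h2, h3⟩ := ih j' hx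
      have hj : j = j' + 1 := by exact (Option.some.inj h).symm
      subst hj
      refine ⟨by simpa using h1, by simpa using h2, ?_⟩
      intro k hk hk'
      match k with
      | 0 => omega
      | k' + 1 =>
        simp only [List.getD_cons_succ]
        exact h3 k' (by omega) (by simpa using hk')
    | none =>
      simp only [pvLast?, hx] at h
      by_cases hx0 : x = 0
      · simp [hx0] at h
      · simp only [hx0, ne_eq, not_false_eq_true, if_true] at h
        have hj : j = 0 := (Option.some.inj h).symm
        subst hj
        refine ⟨by simp, by simpa using hx0, ?_⟩
        intro k hk hk'
        match k with
        | 0 => omega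
        | k' + 1 =>
          simp only [List.getD_cons_succ]
          have hall : ∀ y ∈ xs, y = 0 := (pvLast?_none xs).mp hx
          have hlen : k' < xs.length := by simpa using hk'
          rw [List.getD_eq_getElem xs 0 hlen]
          exact hall _ (List.getElem_mem hlen)

theorem pvBwd_eq (l : List Int) (j : Nat) (hj : l.getD j 0 ≠ 0)
    (hz : ∀ k, j < k → k < l.length → l.getD k 0 = 0) :
    ∀ e, j ≤ e → e < l.length → pvBwd l e = j := by
  intro e
  induction e with
  | zero =>
    intro h1 _
    have : j = 0 := by omega
    simp [pvBwd, this]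
  | succ e' ih =>
    intro h1 h2
    simp only [pvBwd]
    by_cases hc : l.getD (e' + 1) 0 = 0
    · have hne : j ≠ e' + 1 := fun h => hj (h ▸ hc)
      rw [if_pos hc]
      exact ih (by omega) (by omega)
    · have hje : j = e' + 1 := by
        by_contra hne
        exact hc (hz (e' + 1) (by omega) h2)
      rw [if_neg hc]
      exact hje.symm

theorem pvFindFwd_none (l : List Int) : ∀ i, pvFindFwd l i = none ↔ ∀ x ∈ l, x = 0 := by
  induction l with
  | nil => simp [pvFindFwd]
  | cons x xs ih =>
    intro i
    by_cases hx : x = 0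
    · simp [pvFindFwd, hx, ih]
    · simp [pvFindFwd, hx]

-- ===== VERDICT (by name: the statement is the Claim_ definition above) =====
theorem restrict_range_spec : Claim_equal_restrict_range := by
  intro input _ hpre
  unfold Spec_restrict_range restrict_range restrict_range_alt
  rw [pvLoopA_eq]
  have hf : pvFindFwd input 0 ≠ none := by
    intro h
    obtain ⟨x, hx, hx0⟩ := hpre
    exact hx0 ((pvFindFwd_none input 0).mp h x hx)
  have hl : pvLast? input ≠ none := by
    intro h
    obtain ⟨x, hx, hx0⟩ := hpre
    exact hx0 ((pvLast?_none input).mp h x hx)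
  cases hfs : pvFindFwd input 0 with
  | none => exact absurd hfs hf
  | some s =>
    cases hls : pvLast? input with
    | none => exact absurd hls hl
    | some e =>
      obtain ⟨h1, h2, h3⟩ := pvLast?_spec input e hls
      have hb : pvBwd input (input.length - 1) = e :=
        pvBwd_eq input e h2 h3 (input.length - 1) (by omega) (by omega)
      simp [hb, Option.or]

theorem restrict_range_raises : Claim_raises_restrict_range := by
  unfold Claim_raises_restrict_range
  refine ⟨?_, by decide⟩
  intro input _ hr hpre
  obtain ⟨x, hx, hx0⟩ := hpre
  exact hx0 (hr x hx)

-- self-check: the raise witness really lies in Raises_ and B's port returns the stated value there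
theorem restrict_range_raise_witness_ok :
    Raises_restrict_range pvRaiseWitness_restrict_range ∧
      restrict_range_alt pvRaiseWitness_restrict_range = pvRaiseWitnessOut_restrict_range :=
  ⟨restrict_range_raises.2.2.1, restrict_range_raises.2.2.2⟩
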